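-- pv_equiv track=rewrite | github.com/tanmayagarwal1/Code | Algorithms/FullGrids.py | GoldMax
-- ===== SOURCE A (Python) =====
-- def GoldMax(grid):
-- 	m, n = len(grid), len(grid[0])
-- 	if not m or not n : raise ValueError
-- 	gold = [[0 for _ in range(n)] for _ in range(m)]
-- 	for col in range(n - 1, -1, -1):
-- 		for row in range(m):
-- 			if col == n - 1 :
-- 				right = 0
-- 			else:
-- 				right = gold[row][col + 1]
-- 			if col == n - 1 or row == m -1  :
-- 				right_down = 0
-- 			else:
-- 				right_down = gold[row + 1][col + 1]
-- 			if col == n - 1 or row == 0 :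
-- 				right_up = 0
-- 			else:
-- 				right_up = gold[row - 1][col + 1]
-- 			gold[row][col] = max(right_down, right_up, right) + grid[row][col]
-- 	res = 0
-- 	for i in range(m):
-- 		res = max(res, gold[i][0])
-- 	return res
-- ===== SOURCE B (Python) =====
-- def GoldMax(grid):
--     m, n = len(grid), len(grid[0])
--     if not m or not n:
--         raise ValueError
--     memo = {}
--     def f(row, col):
--         if (row, col) in memo:
--             return memo[(row, col)]
--         if col == n - 1:
--             v = grid[row][col]
--         else:
--             v = grid[row][col] + max(f(row, col + 1),
--                                      f(row - 1, col + 1) if row > 0 else 0,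
--                                      f(row + 1, col + 1) if row < m - 1 else 0)
--         memo[(row, col)] = v
--         return v
--     res = 0
--     for r in range(m):
--         res = max(res, f(r, 0))
--     return res
-- ===== Notes on version B (the rewrite author's own statement) =====
-- stated objective: alternative
-- what changed: Replaces A's bottom-up in-place m×n table DP (iterating columns right-to-left, then scanning column 0) with top-down memoized recursion: a helper f(row,col) computed on demand and cached in a dict, with the answer folded over f(r,0).
import Mathlib
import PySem

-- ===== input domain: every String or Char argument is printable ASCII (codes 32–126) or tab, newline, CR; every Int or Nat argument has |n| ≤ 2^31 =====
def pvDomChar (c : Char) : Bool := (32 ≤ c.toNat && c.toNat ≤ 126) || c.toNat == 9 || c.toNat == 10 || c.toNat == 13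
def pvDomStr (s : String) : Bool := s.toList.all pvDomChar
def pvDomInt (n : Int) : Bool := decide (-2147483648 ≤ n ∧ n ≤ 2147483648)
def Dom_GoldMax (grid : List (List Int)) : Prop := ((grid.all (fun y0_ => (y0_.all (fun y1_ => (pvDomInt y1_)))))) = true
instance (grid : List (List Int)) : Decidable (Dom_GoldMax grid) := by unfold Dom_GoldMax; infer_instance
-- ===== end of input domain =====

-- B replaces A's bottom-up in-place m×n table DP with top-down memoized recursion
-- (a helper cached in a dict); same cost, different decomposition; returns agree on Pre_.

-- ===== PORT A =====
-- 2-D access/update helpers; all indices the ports use are in range, so getD/set are exact.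
def pvGet2 (g : List (List Int)) (r c : Nat) : Int := (g.getD r []).getD c 0

def pvSet2 (g : List (List Int)) (r c : Nat) (v : Int) : List (List Int) :=
  g.set r ((g.getD r []).set c v)

-- the body of A's inner `for row in range(m)` loop, at a fixed column
def AInBody (grid : List (List Int)) (m n col : Nat)
    (gold : List (List Int)) (row : Nat) : List (List Int) :=
  let right := if col = n - 1 then 0 else pvGet2 gold row (col + 1)
  let right_down := if col = n - 1 ∨ row = m - 1 then 0 else pvGet2 gold (row + 1) (col + 1)
  let right_up := if col = n - 1 ∨ row = 0 then 0 else pvGet2 gold (row - 1) (col + 1)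
  pvSet2 gold row col (max (max right_down right_up) right + pvGet2 grid row col)

def GoldMaxInner (grid : List (List Int)) (m n : Nat)
    (gold : List (List Int)) (col : Nat) : List (List Int) :=
  (List.range m).foldl (AInBody grid m n col) gold

def GoldMax (grid : List (List Int)) : Int :=
  let m := grid.length
  let n := (grid.getD 0 []).length
  let gold0 := List.replicate m (List.replicate n (0 : Int))
  let gold := (List.range n).reverse.foldl (GoldMaxInner grid m n) gold0
  (List.range m).foldl (fun res i => max res (pvGet2 gold i 0)) 0

-- ===== PORT B =====
-- B's memoized helper f(row, col); `fuel` (≥ n - 1 - col at every call) only makes the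
-- recursion structurally terminating, it changes no computed value on the inputs reached.
def BSolve (grid : List (List Int)) (m n : Nat) :
    Nat → Nat → Nat → PySem.Dict (Nat × Nat) Int → Int × PySem.Dict (Nat × Nat) Int
  | fuel, row, col, memo =>
    match memo.get? (row, col) with
    | some v => (v, memo)
    | none =>
      if col = n - 1 then
        let v := pvGet2 grid row col
        (v, memo.insert (row, col) v)
      else
        match fuel with
        | 0 => (0, memo)
        | fuel + 1 =>
          let p1 := BSolve grid m n fuel row (col + 1) memo
          let p2 := if 0 < row then BSolve grid m n fuel (row - 1) (col + 1) p1.2 else (0, p1.2)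
          let p3 := if row < m - 1 then BSolve grid m n fuel (row + 1) (col + 1) p2.2 else (0, p2.2)
          let v := pvGet2 grid row col + max (max p1.1 p2.1) p3.1
          (v, p3.2.insert (row, col) v)

def GoldMax_alt (grid : List (List Int)) : Int :=
  let m := grid.length
  let n := (grid.getD 0 []).length
  let r := (List.range m).foldl
    (fun (st : Int × PySem.Dict (Nat × Nat) Int) i =>
      let p := BSolve grid m n n i 0 st.2
      (max st.1 p.1, p.2))
    (0, PySem.Dict.empty)
  r.1

-- ===== PRECONDITION & SPEC =====
-- Pre_ excludes exactly the inputs on which Python A raises: the empty grid (IndexError on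
-- grid[0]), an empty first row (explicit ValueError), and ragged grids with a row shorter
-- than the first (IndexError).
def Pre_GoldMax (grid : List (List Int)) : Prop :=
  grid ≠ [] ∧ 0 < (grid.getD 0 []).length ∧
    ∀ row ∈ grid, (grid.getD 0 []).length ≤ row.length
instance (grid : List (List Int)) : Decidable (Pre_GoldMax grid) := by
  unfold Pre_GoldMax; infer_instance

def pvWitness_GoldMax : List (List Int) := [[1, -2], [3, 4]]

def Spec_GoldMax (grid : List (List Int)) (out : Int) : Prop := out = GoldMax_alt grid
instance (grid : List (List Int)) (out : Int) : Decidable (Spec_GoldMax grid out) := by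
  unfold Spec_GoldMax; infer_instance

-- ===== CLAIM (what is proved, stated in full; the proofs are below) =====
def Claim_equal_GoldMax : Prop :=
  ∀ (grid : List (List Int)), Dom_GoldMax grid → Pre_GoldMax grid →
    Spec_GoldMax grid (GoldMax grid)

-- ===== LEMMAS AND PROOFS =====

-- one step of the pure backward DP: the column of values at index c from the column right of it
def GoldColStep (grid : List (List Int)) (m : Nat) (col : List Int) (c : Nat) : List Int :=
  (List.range m).map (fun r =>
    pvGet2 grid r c +
      max (max (col.getD r 0) (if 0 < r then col.getD (r - 1) 0 else 0))
          (if r < m - 1 then col.getD (r + 1) 0 else 0))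

-- the pure column values: dpcol k is the DP column at column index n-1-k
def dpcol (grid : List (List Int)) (m n : Nat) : Nat → List Int
  | 0 => grid.map (fun row => row.getD (n - 1) 0)
  | k + 1 => GoldColStep grid m (dpcol grid m n k) (n - 2 - k)

-- the pure DP value at cell (r, c)
def dpv (grid : List (List Int)) (m n r c : Nat) : Int :=
  (dpcol grid m n ((n - 1) - c)).getD r 0

lemma foldl_rev_range_succ {α : Type} (f : α → Nat → α) (a : α) (n : Nat) :
    (List.range (n + 1)).reverse.foldl f a = (List.range n).reverse.foldl f (f a n) := by
  simp [List.range_succ]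

lemma dpv_last (grid : List (List Int)) (n r : Nat) (hr : r < grid.length) :
    dpv grid grid.length n r (n - 1) = pvGet2 grid r (n - 1) := by
  unfold dpv
  rw [Nat.sub_self]
  unfold dpcol pvGet2
  simp [List.getD, List.getElem?_eq_getElem hr]

lemma dpv_step (grid : List (List Int)) (m n r c : Nat) (hr : r < m) (hc : c < n - 1) :
    dpv grid m n r c =
      pvGet2 grid r c +
        max (max (dpv grid m n r (c + 1)) (if 0 < r then dpv grid m n (r - 1) (c + 1) else 0))
            (if r < m - 1 then dpv grid m n (r + 1) (c + 1) else 0) := by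
  unfold dpv
  have h1 : (n - 1) - c = ((n - 1) - (c + 1)) + 1 := by omega
  have h2 : n - 2 - ((n - 1) - (c + 1)) = c := by omega
  rw [h1]
  conv_lhs => rw [dpcol, h2]
  unfold GoldColStep
  simp [List.getD, List.getElem?_range hr]

-- every value in the memo is the pure DP value of its key
def MemoInv (grid : List (List Int)) (m n : Nat) (memo : PySem.Dict (Nat × Nat) Int) : Prop :=
  ∀ r c v, memo.get? (r, c) = some v → v = dpv grid m n r c

lemma memoInv_insert_dpv (grid : List (List Int)) (m n : Nat)
    (memo : PySem.Dict (Nat × Nat) Int) (row col : Nat)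
    (h : MemoInv grid m n memo) :
    MemoInv grid m n (memo.insert (row, col) (dpv grid m n row col)) := by
  intro r c v hv
  rw [PySem.Dict.get?_insert] at hv
  by_cases he : (r, c) = (row, col)
  · rw [if_pos he] at hv
    obtain ⟨h1, h2⟩ := Prod.mk.injEq .. ▸ he
    cases hv
    rw [h1, h2]
  · rw [if_neg he] at hv
    exact h r c v hv

lemma BSolve_correct (grid : List (List Int)) (n : Nat) :
    ∀ fuel row col memo, row < grid.length → col < n → n - 1 - col ≤ fuel →
      MemoInv grid grid.length n memo →
      (BSolve grid grid.length n fuel row col memo).1 = dpv grid grid.length n row col ∧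
        MemoInv grid grid.length n (BSolve grid grid.length n fuel row col memo).2 := by
  intro fuel
  induction fuel with
  | zero =>
    intro row col memo hr hc hf hinv
    rw [BSolve]
    cases hmv : memo.get? (row, col) with
    | some v => exact ⟨hinv row col v hmv, hinv⟩
    | none =>
      have hcol : col = n - 1 := by omega
      subst hcol
      rw [if_pos rfl]
      exact ⟨(dpv_last grid n row hr).symm,
        dpv_last grid n row hr ▸
          memoInv_insert_dpv grid grid.length n memo row (n - 1) hinv⟩
  | succ fuel ih =>
    intro row col memo hr hc hf hinv
    rw [BSolve]
    cases hmv : memo.get? (row, col) with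
    | some v => exact ⟨hinv row col v hmv, hinv⟩
    | none =>
      by_cases hcol : col = n - 1
      · subst hcol
        rw [if_pos rfl]
        exact ⟨(dpv_last grid n row hr).symm,
          dpv_last grid n row hr ▸
            memoInv_insert_dpv grid grid.length n memo row (n - 1) hinv⟩
      · have hc1 : col < n - 1 := by omega
        simp only [hcol]
        obtain ⟨e1, i1⟩ := ih row (col + 1) memo hr (by omega) (by omega) hinv
        set p1 := BSolve grid grid.length n fuel row (col + 1) memo with hp1
        have hstep2 : ∀ (p2 : Int × PySem.Dict (Nat × Nat) Int),
            p2 = (if 0 < row then BSolve grid grid.length n fuel (row - 1) (col + 1) p1.2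
                  else (0, p1.2)) →
            p2.1 = (if 0 < row then dpv grid grid.length n (row - 1) (col + 1) else 0) ∧
              MemoInv grid grid.length n p2.2 := by
          intro p2 hp2
          by_cases h0 : 0 < row
          · rw [if_pos h0] at hp2
            obtain ⟨e2, i2⟩ := ih (row - 1) (col + 1) p1.2 (by omega) (by omega) (by omega) i1
            rw [hp2, if_pos h0]
            exact ⟨e2, i2⟩
          · rw [if_neg h0] at hp2
            rw [hp2, if_neg h0]
            exact ⟨rfl, i1⟩
        set p2 := (if 0 < row then BSolve grid grid.length n fuel (row - 1) (col + 1) p1.2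
                   else ((0 : Int), p1.2)) with hp2def
        obtain ⟨e2, i2⟩ := hstep2 p2 rfl
        have hstep3 : ∀ (p3 : Int × PySem.Dict (Nat × Nat) Int),
            p3 = (if row < grid.length - 1 then
                    BSolve grid grid.length n fuel (row + 1) (col + 1) p2.2
                  else (0, p2.2)) →
            p3.1 = (if row < grid.length - 1 then dpv grid grid.length n (row + 1) (col + 1)
                    else 0) ∧
              MemoInv grid grid.length n p3.2 := by
          intro p3 hp3
          by_cases hm1 : row < grid.length - 1
          · rw [if_pos hm1] at hp3
            obtain ⟨e3, i3⟩ := ih (row + 1) (col + 1) p2.2 (by omega) (by omega) (by omega) i2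
            rw [hp3, if_pos hm1]
            exact ⟨e3, i3⟩
          · rw [if_neg hm1] at hp3
            rw [hp3, if_neg hm1]
            exact ⟨rfl, i2⟩
        set p3 := (if row < grid.length - 1 then
                     BSolve grid grid.length n fuel (row + 1) (col + 1) p2.2
                   else ((0 : Int), p2.2)) with hp3def
        obtain ⟨e3, i3⟩ := hstep3 p3 rfl
        have hval : pvGet2 grid row col + max (max p1.1 p2.1) p3.1 =
            dpv grid grid.length n row col := by
          rw [e1, e2, e3, dpv_step grid grid.length n row col hr hc1]
        simp only [hval]
        exact ⟨rfl, memoInv_insert_dpv grid grid.length n p3.2 row col i3⟩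

-- B's outer fold over rows, threading the memo
lemma alt_fold (grid : List (List Int)) (n : Nat) (hn : 0 < n) :
    ∀ k, k ≤ grid.length → ∀ (st : Int × PySem.Dict (Nat × Nat) Int),
      MemoInv grid grid.length n st.2 →
      ((List.range k).foldl
        (fun (st : Int × PySem.Dict (Nat × Nat) Int) i =>
          let p := BSolve grid grid.length n n i 0 st.2
          (max st.1 p.1, p.2)) st).1 =
        (List.range k).foldl (fun res i => max res (dpv grid grid.length n i 0)) st.1 ∧
      MemoInv grid grid.length n
        ((List.range k).foldl
          (fun (st : Int × PySem.Dict (Nat × Nat) Int) i =>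
            let p := BSolve grid grid.length n n i 0 st.2
            (max st.1 p.1, p.2)) st).2 := by
  intro k
  induction k with
  | zero => intro _ st hst; exact ⟨rfl, hst⟩
  | succ k ih =>
    intro hk st hst
    obtain ⟨e, i⟩ := ih (by omega) st hst
    rw [List.range_succ, List.foldl_append, List.foldl_append]
    simp only [List.foldl_cons, List.foldl_nil]
    obtain ⟨ek, ik⟩ := BSolve_correct grid n n k 0
      ((List.range k).foldl
        (fun (st : Int × PySem.Dict (Nat × Nat) Int) i =>
          let p := BSolve grid grid.length n n i 0 st.2
          (max st.1 p.1, p.2)) st).2 (by omega) hn (by omega) i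
    exact ⟨by rw [e, ek], ik⟩

-- A's table invariant after processing columns ≥ k
def TblInv (grid : List (List Int)) (m n k : Nat) (T : List (List Int)) : Prop :=
  T.length = m ∧ (∀ i, i < m → (T.getD i []).length = n) ∧
    ∀ i, i < m → ∀ j, k ≤ j → j < n →
      pvGet2 T i j = (dpcol grid m n ((n - 1) - j)).getD i 0

lemma pvGet2_pvSet2 (T : List (List Int)) (r c : Nat) (v : Int) (i j : Nat)
    (hr : r < T.length) (hc : c < (T.getD r []).length) :
    pvGet2 (pvSet2 T r c v) i j = if i = r ∧ j = c then v else pvGet2 T i j := by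
  unfold pvGet2 pvSet2
  simp only [List.getD] at hc ⊢
  by_cases hir : i = r
  · subst hir
    rw [List.getElem?_set_self (by simpa using hr)]
    simp only [Option.getD_some]
    by_cases hjc : j = c
    · subst hjc
      rw [List.getElem?_set_self (by simpa using hc)]
      simp
    · rw [List.getElem?_set_ne (Ne.symm hjc)]
      simp [hjc]
  · rw [List.getElem?_set_ne (Ne.symm hir)]
    simp [hir]

lemma pvSet2_length (T : List (List Int)) (r c : Nat) (v : Int) :
    (pvSet2 T r c v).length = T.length := by simp [pvSet2]

lemma pvSet2_row_length (T : List (List Int)) (r c : Nat) (v : Int) (i : Nat) :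
    ((pvSet2 T r c v).getD i []).length = (T.getD i []).length := by
  unfold pvSet2
  simp only [List.getD]
  by_cases hir : i = r
  · subst hir
    by_cases h : i < T.length
    · rw [List.getElem?_set_self (by simpa using h)]
      simp [List.getElem?_eq_getElem h]
    · have h1 : T.length ≤ i := by omega
      rw [List.getElem?_eq_none (by simpa using h1), List.getElem?_eq_none h1]
  · rw [List.getElem?_set_ne (Ne.symm hir)]

-- value A writes at (i, k), expressed from table T's column k+1
def Aval (grid : List (List Int)) (m n : Nat) (T : List (List Int)) (k i : Nat) : Int :=
  let right := if k = n - 1 then 0 else pvGet2 T i (k + 1)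
  let right_down := if k = n - 1 ∨ i = m - 1 then 0 else pvGet2 T (i + 1) (k + 1)
  let right_up := if k = n - 1 ∨ i = 0 then 0 else pvGet2 T (i - 1) (k + 1)
  max (max right_down right_up) right + pvGet2 grid i k

-- inner row loop: prefix invariant
lemma inner_loop (grid : List (List Int)) (m n k : Nat) (T0 : List (List Int))
    (hlen : T0.length = m) (hrow : ∀ i, i < m → (T0.getD i []).length = n) (hkn : k < n) :
    ∀ r, r ≤ m →
      ((List.range r).foldl (AInBody grid m n k) T0).length = m ∧
      (∀ i, i < m → (((List.range r).foldl (AInBody grid m n k) T0).getD i []).length = n) ∧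
      (∀ i j, ¬ (j = k ∧ i < r) →
        pvGet2 ((List.range r).foldl (AInBody grid m n k) T0) i j = pvGet2 T0 i j) ∧
      (∀ i, i < r →
        pvGet2 ((List.range r).foldl (AInBody grid m n k) T0) i k = Aval grid m n T0 k i) := by
  intro r
  induction r with
  | zero =>
    intro _
    exact ⟨hlen, hrow, fun i j _ => rfl, fun i h => absurd h (by omega)⟩
  | succ r ih =>
    intro hr
    obtain ⟨hTlen, hTrow, hsame, hdone⟩ := ih (by omega)
    have hrm : r < m := by omega
    rw [List.range_succ, List.foldl_append]
    set T := (List.range r).foldl (AInBody grid m n k) T0 with hT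
    simp only [List.foldl_cons, List.foldl_nil]
    unfold AInBody
    simp only []
    have hget := fun i j => pvGet2_pvSet2 T r k
      (max (max (if k = n - 1 ∨ r = m - 1 then 0 else pvGet2 T (r + 1) (k + 1))
            (if k = n - 1 ∨ r = 0 then 0 else pvGet2 T (r - 1) (k + 1)))
          (if k = n - 1 then 0 else pvGet2 T r (k + 1)) + pvGet2 grid r k) i j
      (by rw [hTlen]; exact hrm) (by rw [hTrow r hrm]; exact hkn)
    refine ⟨?_, ?_, ?_, ?_⟩
    · rw [pvSet2_length]; exact hTlen
    · intro i hi; rw [pvSet2_row_length]; exact hTrow i hi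
    · intro i j hij
      rw [hget i j, if_neg (by rintro ⟨h1, h2⟩; exact hij ⟨h2, by omega⟩)]
      exact hsame i j (by rintro ⟨h1, h2⟩; exact hij ⟨h1, by omega⟩)
    · intro i hi
      rw [hget i k]
      by_cases hir : i = r
      · subst hir
        rw [if_pos ⟨rfl, rfl⟩]
        unfold Aval
        have e1 : pvGet2 T i (k + 1) = pvGet2 T0 i (k + 1) :=
          hsame i (k + 1) (by rintro ⟨h, _⟩; omega)
        have e2 : pvGet2 T (i + 1) (k + 1) = pvGet2 T0 (i + 1) (k + 1) :=
          hsame (i + 1) (k + 1) (by rintro ⟨h, _⟩; omega)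
        have e3 : pvGet2 T (i - 1) (k + 1) = pvGet2 T0 (i - 1) (k + 1) :=
          hsame (i - 1) (k + 1) (by rintro ⟨h, _⟩; omega)
        simp only [e1, e2, e3]
      · rw [if_neg (by rintro ⟨h, _⟩; exact hir h)]
        exact hdone i (by omega)

-- one outer step preserves the invariant
lemma step_inv (grid : List (List Int)) (m n k : Nat) (hm : m = grid.length) (hkn : k < n)
    (T : List (List Int)) (hT : TblInv grid m n (k + 1) T) :
    TblInv grid m n k (GoldMaxInner grid m n T k) := by
  obtain ⟨hlen, hrow, hcols⟩ := hT
  obtain ⟨hTlen, hTrow, hsame, hdone⟩ :=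
    inner_loop grid m n k T hlen hrow hkn m (le_refl m)
  unfold GoldMaxInner
  refine ⟨hTlen, hTrow, ?_⟩
  intro i hi j hkj hjn
  by_cases hjk : j = k
  · rw [hjk, hdone i hi]
    -- show Aval = dpcol entry
    unfold Aval
    dsimp only
    by_cases hlast : k = n - 1
    · subst hlast
      have hnn : (n - 1) - (n - 1) = 0 := by omega
      rw [hnn]
      have : (dpcol grid m n 0).getD i 0 = (grid.getD i []).getD (n - 1) 0 := by
        unfold dpcol
        rw [hm] at hi
        simp [List.getD, List.getElem?_map, List.getElem?_eq_getElem hi]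
      rw [this]
      simp [pvGet2]
    · have hk1 : k + 1 < n := by omega
      have hknn : k < n - 1 := by omega
      have c1 : pvGet2 T i (k + 1) = (dpcol grid m n ((n - 1) - (k + 1))).getD i 0 :=
        hcols i hi (k + 1) (le_refl _) hk1
      have hcol : (n - 1) - k = ((n - 1) - (k + 1)) + 1 := by omega
      have hc2 : n - 2 - ((n - 1) - (k + 1)) = k := by omega
      rw [hcol]
      conv_rhs => rw [dpcol, hc2]
      unfold GoldColStep
      have : ((List.range m).map (fun r =>
          pvGet2 grid r k +
            max (max ((dpcol grid m n ((n - 1) - (k + 1))).getD r 0)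
                  (if 0 < r then (dpcol grid m n ((n - 1) - (k + 1))).getD (r - 1) 0 else 0))
              (if r < m - 1 then (dpcol grid m n ((n - 1) - (k + 1))).getD (r + 1) 0 else 0))).getD i 0 =
          pvGet2 grid i k +
            max (max ((dpcol grid m n ((n - 1) - (k + 1))).getD i 0)
                  (if 0 < i then (dpcol grid m n ((n - 1) - (k + 1))).getD (i - 1) 0 else 0))
              (if i < m - 1 then (dpcol grid m n ((n - 1) - (k + 1))).getD (i + 1) 0 else 0) := by
        simp [List.getD, List.getElem?_map, List.getElem?_range hi]
      rw [this, if_neg hlast, c1]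
      by_cases him : i = m - 1
      · rw [if_pos (Or.inr him), if_neg (by omega : ¬ i < m - 1)]
        by_cases hi0 : i = 0
        · rw [if_pos (Or.inr hi0), if_neg (by omega : ¬ 0 < i)]
          generalize (dpcol grid m n ((n - 1) - (k + 1))).getD i 0 = a
          omega
        · rw [if_neg (by simp [hlast, hi0]), if_pos (by omega : 0 < i)]
          rw [hcols (i - 1) (by omega) (k + 1) (le_refl _) hk1]
          generalize (dpcol grid m n ((n - 1) - (k + 1))).getD i 0 = a
          generalize (dpcol grid m n ((n - 1) - (k + 1))).getD (i - 1) 0 = b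
          omega
      · rw [if_neg (by simp [hlast, him]), if_pos (by omega : i < m - 1)]
        rw [hcols (i + 1) (by omega) (k + 1) (le_refl _) hk1]
        by_cases hi0 : i = 0
        · rw [if_pos (Or.inr hi0), if_neg (by omega : ¬ 0 < i)]
          generalize (dpcol grid m n ((n - 1) - (k + 1))).getD i 0 = a
          generalize (dpcol grid m n ((n - 1) - (k + 1))).getD (i + 1) 0 = c
          omega
        · rw [if_neg (by simp [hlast, hi0]), if_pos (by omega : 0 < i)]
          rw [hcols (i - 1) (by omega) (k + 1) (le_refl _) hk1]
          generalize (dpcol grid m n ((n - 1) - (k + 1))).getD i 0 = a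
          generalize (dpcol grid m n ((n - 1) - (k + 1))).getD (i - 1) 0 = b
          generalize (dpcol grid m n ((n - 1) - (k + 1))).getD (i + 1) 0 = c
          omega
  · rw [hsame i j (by rintro ⟨h, _⟩; exact hjk h)]
    exact hcols i hi j (by omega) hjn

-- A's outer fold establishes the full invariant
lemma outer_fold (grid : List (List Int)) (m n : Nat) (hm : m = grid.length) :
    ∀ k, k ≤ n → ∀ T, TblInv grid m n k T →
      TblInv grid m n 0 ((List.range k).reverse.foldl (GoldMaxInner grid m n) T) := by
  intro k
  induction k with
  | zero => intro _ T hT; simpa using hT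
  | succ k ih =>
    intro hk T hT
    rw [foldl_rev_range_succ]
    exact ih (by omega) _ (step_inv grid m n k hm (by omega) T hT)

lemma foldl_range_congr {α : Type} (f g : α → Nat → α) (m : Nat)
    (h : ∀ a i, i < m → f a i = g a i) :
    ∀ acc, (List.range m).foldl f acc = (List.range m).foldl g acc := by
  induction m with
  | zero => intro acc; simp
  | succ m ih =>
    intro acc
    rw [List.range_succ, List.foldl_append, List.foldl_append,
      ih (fun a i hi => h a i (by omega)) acc]
    simp [h _ m (by omega)]

-- ===== VERDICT (by name: the statement is the Claim_ definition above) =====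
theorem GoldMax_spec : Claim_equal_GoldMax := by
  intro grid _ hpre
  obtain ⟨hne, hn0, -⟩ := hpre
  unfold Spec_GoldMax GoldMax GoldMax_alt
  dsimp only
  set m := grid.length with hm
  set n := (grid.getD 0 []).length with hn
  have hminv : TblInv grid m n n (List.replicate m (List.replicate n (0 : Int))) := by
    refine ⟨by simp, ?_, ?_⟩
    · intro i hi
      simp [List.getD, hi]
    · intro i _ j hj1 hj2; omega
  have hfin := outer_fold grid m n hm n (le_refl n) _ hminv
  obtain ⟨hlen, hrowlen, hcols⟩ := hfin
  -- B side: the memoized fold computes the pure DP values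
  have hB := alt_fold grid n hn0 m (by omega)
    (0, PySem.Dict.empty) (fun r c v h => by simp [PySem.Dict.get?_empty] at h)
  rw [← hm] at hB
  rw [hB.1]
  -- A side: column 0 of the final table is the pure DP column
  apply foldl_range_congr
  intro a i hi
  rw [hcols i hi 0 (le_refl 0) (by omega)]
  rfl
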